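-- pv_equiv track=rewrite | github.com/jiangtianyu2009/bop | Leetcode/Palindrome Number.py | equalreverse
-- ===== SOURCE A (Python) =====
-- def equalreverse(p):
--     """
--     :type x: int
--     :rtype: bool
--     """
--     if p > 0:
--         x = p
--     else:
--         x = -p
--     y = 0
--
--     while x != 0:
--         n = x % 10
--         y = y * 10 + n
--         x = x // 10
--
--     if y == p:
--         return True
--     else:
--         return False
-- ===== SOURCE B (Python) =====
-- def equalreverse(p):
--     if p < 0:
--         return False
--     d = []
--     x = p
--     while x != 0:
--         d.append(x % 10)
--         x //= 10
--     return d == d[::-1]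
-- ===== Notes on version B (the rewrite author's own statement) =====
-- stated objective: alternative
-- what changed: Instead of rebuilding a reversed integer with a multiply-accumulate loop and comparing it to p, B rejects negatives up front, collects the digit list once and checks that it equals its own reverse.
import Mathlib
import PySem

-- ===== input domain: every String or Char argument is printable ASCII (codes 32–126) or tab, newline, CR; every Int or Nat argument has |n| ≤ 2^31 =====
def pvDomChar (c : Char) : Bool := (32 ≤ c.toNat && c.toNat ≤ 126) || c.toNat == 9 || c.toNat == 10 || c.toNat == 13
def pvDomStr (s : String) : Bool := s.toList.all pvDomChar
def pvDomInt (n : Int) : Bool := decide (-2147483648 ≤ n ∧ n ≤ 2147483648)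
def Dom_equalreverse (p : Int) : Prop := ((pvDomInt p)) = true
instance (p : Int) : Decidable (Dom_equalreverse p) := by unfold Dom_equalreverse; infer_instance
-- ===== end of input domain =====

-- B checks the digit list against its reverse instead of rebuilding a reversed integer; same cost, different structure.
-- ===== PORT A =====
-- while-loop of A, transliterated with fuel (each iteration: n = x % 10; y = y*10 + n; x = x // 10)
def pvRevLoop : Nat → Int → Int → Int
  | 0, _, y => y
  | f+1, x, y =>
    if x ≠ 0 then pvRevLoop f (PySem.Int.floordiv x 10) (y * 10 + PySem.Int.mod x 10) else y

def equalreverse (p : Int) : Bool :=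
  let x := if p > 0 then p else -p
  let y := pvRevLoop (x.natAbs + 1) x 0
  if y = p then true else false

-- ===== PORT B =====
-- while-loop of B, transliterated with fuel (each iteration: d.append(x % 10); x //= 10)
def pvDigLoop : Nat → Int → List Int → List Int
  | 0, _, d => d
  | f+1, x, d =>
    if x ≠ 0 then pvDigLoop f (PySem.Int.floordiv x 10) (d ++ [PySem.Int.mod x 10]) else d

def equalreverse_alt (p : Int) : Bool :=
  if p < 0 then false
  else
    let d := pvDigLoop (p.natAbs + 1) p []
    d = d.reverse  -- d == d[::-1]

-- ===== PRECONDITION & SPEC =====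
def Spec_equalreverse (p : Int) (out : Bool) : Prop := out = equalreverse_alt p
instance (p : Int) (out : Bool) : Decidable (Spec_equalreverse p out) := by unfold Spec_equalreverse; infer_instance

-- ===== CLAIM (what is proved, stated in full; the proofs are below) =====
def Claim_equal_equalreverse : Prop := ∀ (p : Int), Dom_equalreverse p → Spec_equalreverse p (equalreverse p)

-- ===== LEMMAS AND PROOFS =====

lemma pvDigLoop_spec (f : Nat) : ∀ (n : Nat) (acc : List Int), n < 10 ^ f →
    pvDigLoop f (n : Int) acc = acc ++ (Nat.digits 10 n).map (fun d : Nat => (d : Int)) := by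
  induction f with
  | zero => intro n acc h; interval_cases n; simp [pvDigLoop]
  | succ f ih =>
    intro n acc h
    by_cases hn : n = 0
    · simp [pvDigLoop, hn]
    · have hcast : (n : Int) ≠ 0 := by exact_mod_cast hn
      have hdiv : PySem.Int.floordiv (n : Int) 10 = ((n / 10 : Nat) : Int) := by
        exact_mod_cast PySem.Int.floordiv_natCast n 10
      have hmod : PySem.Int.mod (n : Int) 10 = ((n % 10 : Nat) : Int) := by
        exact_mod_cast PySem.Int.mod_natCast n 10
      have hlt : n / 10 < 10 ^ f := by
        rw [Nat.div_lt_iff_lt_mul (by norm_num)]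
        calc n < 10 ^ (f+1) := h
        _ = 10 ^ f * 10 := by ring
      rw [pvDigLoop, if_pos hcast, hdiv, hmod, ih (n/10) _ hlt,
        Nat.digits_def' (by norm_num) (Nat.pos_of_ne_zero hn)]
      simp
lemma pvRevLoop_spec (f : Nat) : ∀ (n : Nat) (y : Int), n < 10 ^ f →
    pvRevLoop f (n : Int) y
      = y * 10 ^ (Nat.digits 10 n).length + ((Nat.ofDigits 10 (Nat.digits 10 n).reverse : Nat) : Int) := by
  induction f with
  | zero => intro n y h; interval_cases n; simp [pvRevLoop]
  | succ f ih =>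
    intro n y h
    by_cases hn : n = 0
    · simp [pvRevLoop, hn]
    · have hcast : (n : Int) ≠ 0 := by exact_mod_cast hn
      have hdiv : PySem.Int.floordiv (n : Int) 10 = ((n / 10 : Nat) : Int) := by
        exact_mod_cast PySem.Int.floordiv_natCast n 10
      have hmod : PySem.Int.mod (n : Int) 10 = ((n % 10 : Nat) : Int) := by
        exact_mod_cast PySem.Int.mod_natCast n 10
      have hlt : n / 10 < 10 ^ f := by
        rw [Nat.div_lt_iff_lt_mul (by norm_num)]
        calc n < 10 ^ (f+1) := h
        _ = 10 ^ f * 10 := by ring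
      rw [pvRevLoop, if_pos hcast, hdiv, hmod, ih (n/10) _ hlt,
        Nat.digits_def' (by norm_num) (Nat.pos_of_ne_zero hn)]
      simp
      rw [Nat.ofDigits_append, Nat.ofDigits_singleton]
      push_cast [List.length_reverse]
      ring
lemma ofDigits_reverse_eq_iff (n : Nat) :
    Nat.ofDigits 10 (Nat.digits 10 n).reverse = n ↔ (Nat.digits 10 n).reverse = Nat.digits 10 n := by
  constructor
  · intro h
    rcases hL : Nat.digits 10 n with _ | ⟨a, t⟩
    · simp
    · by_cases ha : a = 0
      · exfalso
        subst ha
        rw [hL, List.reverse_cons, Nat.ofDigits_append_zero] at h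
        have hlt : Nat.ofDigits 10 t.reverse < 10 ^ t.reverse.length := by
          apply Nat.ofDigits_lt_base_pow_length'
          intro d hd
          exact Nat.digits_lt_base (by norm_num) (by rw [hL]; exact List.mem_cons_of_mem _ (List.mem_reverse.mp hd))
        have hn0 : n ≠ 0 := by
          intro h0
          rw [h0] at hL
          simp at hL
        have hge : 10 ^ t.length ≤ n := by
          have h10 := Nat.base_pow_length_digits_le 10 n (by norm_num) hn0
          rw [hL] at h10
          simp only [List.length_cons, pow_succ] at h10
          rw [mul_comm 10 n] at h10
          exact Nat.le_of_mul_le_mul_right h10 (by norm_num)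
        simp [List.length_reverse] at hlt
        omega
      · have hne : (Nat.digits 10 n).reverse ≠ [] := by rw [hL]; simp
        have hall : ∀ d ∈ (Nat.digits 10 n).reverse, d < 10 := fun d hd =>
          Nat.digits_lt_base (by norm_num) (List.mem_reverse.mp hd)
        have hlast : (Nat.digits 10 n).reverse.getLast hne ≠ 0 := by
          rw [List.getLast_reverse]
          simpa [hL] using ha
        have hdig := Nat.digits_ofDigits 10 (by norm_num) _ hall (fun _ => hlast)
        rw [h] at hdig
        rw [← hL]
        exact hdig.symm
  · intro h; rw [h, Nat.ofDigits_digits]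

lemma lt_pow_fuel (n : Nat) : n < 10 ^ (n + 1) := by
  calc n < 10 ^ n := Nat.lt_pow_self (by norm_num)
  _ ≤ 10 ^ (n + 1) := Nat.pow_le_pow_right (by norm_num) (Nat.le_succ n)

-- ===== VERDICT (by name: the statement is the Claim_ definition above) =====
theorem equalreverse_spec : Claim_equal_equalreverse := by
  intro p _
  show equalreverse p = equalreverse_alt p
  have hx : (if p > 0 then p else -p) = ((p.natAbs : Nat) : Int) := by
    split_ifs <;> omega
  have hr := pvRevLoop_spec (p.natAbs + 1) p.natAbs 0 (lt_pow_fuel p.natAbs)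
  rw [zero_mul, zero_add] at hr
  by_cases hp : p < 0
  · have hA : equalreverse p = false := by
      unfold equalreverse
      rw [hx]
      simp only [Int.natAbs_natCast, hr]
      rw [if_neg (by omega)]
    rw [hA]
    unfold equalreverse_alt
    rw [if_pos hp]
  · obtain ⟨n, rfl⟩ : ∃ n : Nat, p = (n : Int) := ⟨p.toNat, by omega⟩
    have hd := pvDigLoop_spec (n + 1) n [] (lt_pow_fuel n)
    rw [List.nil_append] at hd
    have hr' := pvRevLoop_spec (n + 1) n 0 (lt_pow_fuel n)
    rw [zero_mul, zero_add] at hr'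
    have key : (((Nat.ofDigits 10 (Nat.digits 10 n).reverse : Nat) : Int) = ((n : Nat) : Int))
        ↔ ((Nat.digits 10 n).map (fun d : Nat => (d : Int))
            = ((Nat.digits 10 n).map (fun d : Nat => (d : Int))).reverse) := by
      rw [Int.natCast_inj, ofDigits_reverse_eq_iff, ← List.map_reverse]
      constructor
      · intro h; rw [h]
      · intro h
        exact ((List.map_injective_iff.mpr (fun a b hab => by exact_mod_cast hab)) h).symm
    unfold equalreverse equalreverse_alt
    rw [if_neg hp]
    have hxx : (if (n : Int) > 0 then (n : Int) else -(n : Int)) = (n : Int) := by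
      split_ifs <;> omega
    simp only [hxx, Int.natAbs_natCast, hr', hd]
    by_cases hk : ((Nat.ofDigits 10 (Nat.digits 10 n).reverse : Nat) : Int) = (n : Int)
    · rw [if_pos hk]
      have hpal := key.mp hk
      simp [← hpal]
    · rw [if_neg hk]
      have hpal : ¬ ((Nat.digits 10 n).map (fun d : Nat => (d : Int))
          = ((Nat.digits 10 n).map (fun d : Nat => (d : Int))).reverse) := fun hcon => hk (key.mpr hcon)
      simp [hpal]
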